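-- pv_equiv track=rewrite | github.com/m-webster/CSSLO | test/flag_complex.py | flagAdj
-- ===== SOURCE A (Python) =====
-- import itertools as iter
--
-- def flagAdj(F,i):
--     '''make adjacency matrix from set of flags F
--     flags are adjacent if they are the same, apart from component i'''
--     n = len(F)
--     A = [set() for i in range(n)]
--     adjDict = dict()
--     for j in range(n):
--         ## k is the flag with component i cleared
--         k = F[j].copy()
--         k[i] = 0
--         k = tuple(k)
--         if k not in adjDict:
--             adjDict[k] = []
--         adjDict[k].append(j)
--     for k,FList in adjDict.items():
--         ## take pairs of flags which have the same k, and make adjacency matrix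
--         for (a,b) in iter.combinations(FList,2):
--             A[a].add(b)
--             A[b].add(a)
--     return A
-- ===== SOURCE B (Python) =====
-- def flagAdj(F, i):
--     '''make adjacency matrix from set of flags F
--     flags are adjacent if they are the same, apart from component i'''
--     n = len(F)
--     keys = []
--     for j in range(n):
--         k = F[j].copy()
--         k[i] = 0
--         keys.append(tuple(k))
--     return [{p for p in range(n) if p != j and keys[p] == keys[j]}
--             for j in range(n)]
-- ===== Notes on version B (the rewrite author's own statement) =====
-- stated objective: simpler
-- what changed: B drops A's dict-grouping phase and the itertools.combinations pair-enumeration entirely: it precomputes each flag's i-zeroed key once and defines each adjacency set directly by a pairwise key comparison over all indices (brute force from the definition of adjacency).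
import Mathlib
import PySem

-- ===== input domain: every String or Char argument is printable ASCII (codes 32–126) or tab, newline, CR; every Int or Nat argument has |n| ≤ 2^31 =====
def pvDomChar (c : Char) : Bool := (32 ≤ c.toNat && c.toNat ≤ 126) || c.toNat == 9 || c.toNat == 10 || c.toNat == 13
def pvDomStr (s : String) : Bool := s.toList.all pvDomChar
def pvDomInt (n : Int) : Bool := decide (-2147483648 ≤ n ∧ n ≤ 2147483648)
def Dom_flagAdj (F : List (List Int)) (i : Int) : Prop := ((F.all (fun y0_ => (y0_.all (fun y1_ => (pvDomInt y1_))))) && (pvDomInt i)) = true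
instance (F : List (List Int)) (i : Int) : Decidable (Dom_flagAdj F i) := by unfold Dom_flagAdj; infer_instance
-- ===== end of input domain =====

-- B replaces A's dict-grouping + itertools.combinations phases by the definition itself:
-- precompute each flag's i-zeroed key, then each adjacency set is a direct pairwise key
-- comparison over all indices. Objective: simpler (B is brute force, O(n^2*m), not faster).
-- Note: A mutates nothing observable; the equivalence is about the return value.

-- ===== PORT A =====
-- shared with port B: `k = F[j].copy(); k[i] = 0; k = tuple(k)` (pySetD/pyGetD exact under Pre_)
def pvKey (F : List (List Int)) (i : Int) (j : Int) : List Int :=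
  PySem.List.pySetD (PySem.List.pyGetD F j []) i 0

-- `A[x].add(v)` on a list of sets (indices produced by the loops are in range)
def pvSetAdd (A : List (PySem.Set Int)) (x v : Int) : List (PySem.Set Int) :=
  PySem.List.pySetD A x (PySem.Set.add (PySem.List.pyGetD A x []) v)

def flagAdj (F : List (List Int)) (i : Int) : List (List Int) :=
  let n := F.length
  let A0 : List (PySem.Set Int) := (List.range n).map (fun _ => PySem.Set.empty)
  let adjDict : PySem.Dict (List Int) (List Int) :=
    (PySem.List.pyRange 0 (n : Int) 1).foldl (fun d j =>
      let k := pvKey F i j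
      let d := if d.contains k then d else d.insert k []
      d.modify k [] (fun l => l ++ [j])) PySem.Dict.empty
  adjDict.items.foldl (fun A kv =>
    (PySem.List.combinations kv.2 2).foldl (fun A pr =>
      match pr with
      | [a, b] => pvSetAdd (pvSetAdd A a b) b a
      | _ => A) A) A0

-- ===== PORT B =====
-- keys[j] = tuple of F[j] with component i zeroed; A[j] = {p | p ≠ j, keys[p] == keys[j]}
def flagAdj_alt (F : List (List Int)) (i : Int) : List (List Int) :=
  let n := F.length
  let keys : List (List Int) :=
    (PySem.List.pyRange 0 (n : Int) 1).foldl (fun ks j => ks ++ [pvKey F i j]) []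
  (PySem.List.pyRange 0 (n : Int) 1).map (fun j =>
    PySem.Set.ofList ((PySem.List.pyRange 0 (n : Int) 1).filter
      (fun p => p != j && PySem.List.pyGetD keys p [] == PySem.List.pyGetD keys j [])))

-- ===== PRECONDITION & SPEC =====
-- Pre_ excludes exactly the inputs where `k[i] = 0` raises IndexError in A (i not a valid
-- Python index into some flag).
def Pre_flagAdj (F : List (List Int)) (i : Int) : Prop :=
  ∀ f ∈ F, PySem.Raise.InRange f.length i

instance (F : List (List Int)) (i : Int) : Decidable (Pre_flagAdj F i) := by
  unfold Pre_flagAdj; infer_instance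

def pvWitness_flagAdj : List (List Int) × Int := ([[1, 2], [1, 3], [2, 3]], 1)

def Spec_flagAdj (F : List (List Int)) (i : Int) (out : List (List Int)) : Prop := out = flagAdj_alt F i
instance (F : List (List Int)) (i : Int) (out : List (List Int)) : Decidable (Spec_flagAdj F i out) := by unfold Spec_flagAdj; infer_instance

-- ===== CLAIM (what is proved, stated in full; the proofs are below) =====
def Claim_equal_flagAdj : Prop := ∀ (F : List (List Int)) (i : Int), Dom_flagAdj F i → Pre_flagAdj F i → Spec_flagAdj F i (flagAdj F i)

-- ===== LEMMAS AND PROOFS =====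

-- one edge-insertion operation: position, value
def pvStep (A : List (PySem.Set Int)) (op : Int × Int) : List (PySem.Set Int) :=
  pvSetAdd A op.1 op.2

def pvPairOps : List Int → List (Int × Int)
  | [a, b] => [(a, b), (b, a)]
  | _ => []

-- operations targeting position t, in order
def pvSel (t : Int) (ops : List (Int × Int)) : List Int :=
  (ops.filter (fun op => op.1 == t)).map (·.2)

theorem pv_pointwise (ops : List (Int × Int)) (A : List (PySem.Set Int)) (t : Nat)
    (h : ∀ op ∈ ops, 0 ≤ op.1 ∧ op.1 < (A.length : Int)) :
    (ops.foldl pvStep A)[t]? = A[t]?.map (fun s => (pvSel (t : Int) ops).foldl PySem.Set.add s) := by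
  induction ops generalizing A with
  | nil => simp [pvSel]
  | cons op rest ih =>
    obtain ⟨h0, h1⟩ := h op (by simp)
    have hset : pvStep A op
        = A.set op.1.toNat (PySem.Set.add (PySem.List.pyGetD A op.1 []) op.2) := by
      simp [pvStep, pvSetAdd, PySem.List.pySetD_of_nonneg _ _ h0]
    have hrest : ∀ op' ∈ rest, 0 ≤ op'.1 ∧ op'.1 < ((pvStep A op).length : Int) := by
      intro op' hm
      have := h op' (by simp [hm])
      simpa [hset, List.length_set] using this
    rw [List.foldl_cons, ih _ hrest, hset]
    have hsel : pvSel (t : Int) (op :: rest)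
        = (if op.1 == (t : Int) then [op.2] else []) ++ pvSel (t : Int) rest := by
      simp [pvSel, List.filter_cons]
      split <;> simp
    rw [hsel]
    by_cases hx : op.1 = (t : Int)
    · have hxt : op.1.toNat = t := by omega
      have ht : t < A.length := by omega
      simp [hx, ht]
    · have hxt : op.1.toNat ≠ t := by omega
      simp [hxt, hx]

-- sel homomorphisms
theorem pvSel_append (t : Int) (l1 l2 : List (Int × Int)) :
    pvSel t (l1 ++ l2) = pvSel t l1 ++ pvSel t l2 := by
  simp [pvSel, List.filter_append]

theorem pvSel_flatMap {α : Type} (t : Int) (l : List α) (g : α → List (Int × Int)) :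
    pvSel t (l.flatMap g) = l.flatMap (fun x => pvSel t (g x)) := by
  simp [pvSel, List.filter_flatMap, List.map_flatMap]

-- single-hit flatMap
theorem pv_flatMap_single {α β : Type} [DecidableEq α] (l : List α) (a : α) (r : List β)
    (h : l.Nodup) : (l.flatMap (fun x => if x = a then r else []) = if a ∈ l then r else []) := by
  induction l with
  | nil => simp
  | cons x xs ih =>
    simp only [List.nodup_cons] at h
    by_cases hx : x = a
    · subst hx
      simp [h.1, ih h.2, List.flatMap_cons]
    · have : ¬ (a = x) := fun e => hx e.symm
      simp [List.flatMap_cons, hx, ih h.2, this]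

theorem pv_comb_fold (g : List Int) (A : List (PySem.Set Int)) :
    (PySem.List.combinations g 2).foldl (fun A pr =>
      match pr with
      | [a, b] => pvSetAdd (pvSetAdd A a b) b a
      | _ => A) A
    = ((PySem.List.combinations g 2).flatMap pvPairOps).foldl pvStep A := by
  rw [List.foldl_flatMap]
  apply PySem.List.foldl_congr_mem
  intro acc pr _
  match pr with
  | [] => rfl
  | [a] => rfl
  | [a, b] => rfl
  | a :: b :: c :: r => rfl

theorem pv_aux1 (xs : List Int) (x : Int) (h : x ∉ xs) :
    xs.flatMap (fun b => [b] ++ (if b == x then [x] else [])) = xs := by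
  induction xs with
  | nil => simp
  | cons y ys ih =>
    simp only [List.mem_cons, not_or] at h
    have ih' := ih h.2
    simp only [beq_iff_eq, List.singleton_append] at ih' ⊢
    simp [List.flatMap_cons, ih', show y ≠ x from fun e => h.1 e.symm]

-- Lemma C: ops targeting t among the pair-ops of combinations(g,2)
theorem pv_sel_comb (g : List Int) (t : Int) (hnd : g.Nodup) :
    pvSel t ((PySem.List.combinations g 2).flatMap pvPairOps)
      = if t ∈ g then g.erase t else [] := by
  induction g with
  | nil => simp [PySem.List.combinations_nil_succ, pvSel]
  | cons x xs ih =>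
    simp only [List.nodup_cons] at hnd
    have hrw : PySem.List.combinations (x :: xs) 2
        = xs.map (fun b => [x, b]) ++ PySem.List.combinations xs 2 := by
      rw [PySem.List.combinations_cons_succ, PySem.List.combinations_one]
      simp [List.map_map, Function.comp]
    rw [hrw, List.flatMap_append, pvSel_append, ih hnd.2]
    have hfirst : pvSel t ((xs.map (fun b => [x, b])).flatMap pvPairOps)
        = xs.flatMap (fun b => (if x == t then [b] else []) ++ (if b == t then [x] else [])) := by
      rw [List.flatMap_map]
      rw [pvSel_flatMap]
      congr 1
      funext b
      by_cases hxt : x = t <;> by_cases hbt : b = t <;>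
        simp [pvPairOps, pvSel, hxt, hbt]
    rw [hfirst]
    by_cases hx : t = x
    · subst hx
      have : xs.flatMap (fun b => (if t == t then [b] else []) ++ (if b == t then [t] else []))
          = xs := by
        simpa using pv_aux1 xs t hnd.1
      rw [this]
      simp [hnd.1, List.erase_cons_head]
    · have hne : ∀ b, ((if x == t then [b] else []) : List Int) = [] := by
        intro b; simp [beq_iff_eq, Ne.symm, hx]
      have : xs.flatMap (fun b => (if x == t then [b] else []) ++ (if b == t then [x] else []))
          = xs.flatMap (fun b => if b = t then [x] else []) := by
        congr 1; funext b; rw [hne b]; simp [beq_iff_eq]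
      rw [this, pv_flatMap_single xs t [x] hnd.2]
      have hec : (x :: xs).erase t = x :: xs.erase t :=
        List.erase_cons_tail (by simp [beq_iff_eq]; exact fun e => hx e.symm)
      by_cases ht : t ∈ xs
      · simp [ht, hx, hec]
      · simp [ht, hx]

-- A's first loop body is a single Dict.modify
theorem pv_dictA_body (F : List (List Int)) (i : Int) (d : PySem.Dict (List Int) (List Int)) (j : Int) :
    (let k := pvKey F i j
     let d := if d.contains k then d else d.insert k []
     d.modify k [] (fun l => l ++ [j]))
    = d.modify (pvKey F i j) [] (fun l => l ++ [j]) := by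
  set k := pvKey F i j with hk
  by_cases hc : d.contains k
  · simp [hc]
  · simp only [hc, Bool.false_eq_true, if_false, PySem.Dict.modify]
    rw [PySem.Dict.getD_insert_self, PySem.Dict.insert_insert_self]
    have hget : d.getD k [] = [] := PySem.Dict.getD_of_not_contains d [] (by simpa using hc)
    rw [hget]

-- getD of the grouping fold
theorem pv_group_getD (F : List (List Int)) (i : Int) (js : List Int)
    (d : PySem.Dict (List Int) (List Int)) (c : List Int) :
    (js.foldl (fun d j => d.modify (pvKey F i j) [] (fun l => l ++ [j])) d).getD c []
      = d.getD c [] ++ js.filter (fun j => pvKey F i j == c) := by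
  have h := PySem.Dict.getD_foldl_modify_append (l := js.map (fun j => (pvKey F i j, j))) (d := d) (c := c)
  rw [List.foldl_map] at h
  simp only at h
  rw [h, List.filter_map]
  simp [Function.comp_def]

theorem pv_dictA_items (F : List (List Int)) (i : Int) (js : List Int) :
    (js.foldl (fun d j => d.modify (pvKey F i j) [] (fun l => l ++ [j])) PySem.Dict.empty).items
      = (PySem.Set.ofList (js.map (pvKey F i))).map
          (fun k => (k, js.filter (fun j => pvKey F i j == k))) := by
  set d := js.foldl (fun d j => d.modify (pvKey F i j) [] (fun l => l ++ [j])) PySem.Dict.empty with hd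
  have hnd : d.keys.Nodup := by
    rw [hd]
    exact PySem.Dict.nodup_keys_foldl_modify_key js (pvKey F i) []
      (fun d j l => l ++ [j]) PySem.Dict.empty (by simp [PySem.Dict.keys_empty])
  have hkeys : d.keys = PySem.Set.ofList (js.map (pvKey F i)) := by
    rw [hd, PySem.Dict.keys_foldl_modify_key]
    simp [PySem.Dict.keys_empty, PySem.Set.update_nil_left]
  have hitems := PySem.Dict.items_eq_map_keys d hnd []
  rw [hitems, hkeys]
  apply List.map_congr_left
  intro k _
  rw [hd, pv_group_getD]
  simp [PySem.Dict.getD_empty]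

-- positions used by A's operation stream lie in js
theorem pv_opsA_pos (F : List (List Int)) (i : Int) (js : List Int) (op : Int × Int)
    (h : op ∈ ((PySem.Set.ofList (js.map (pvKey F i))).map
          (fun k => (k, js.filter (fun j => pvKey F i j == k)))).flatMap
        (fun kv => (PySem.List.combinations kv.2 2).flatMap pvPairOps)) :
    op.1 ∈ js := by
  obtain ⟨kv, hkv, hop⟩ := List.mem_flatMap.mp h
  obtain ⟨pr, hpr, hop2⟩ := List.mem_flatMap.mp hop
  have hsub : pr.Sublist kv.2 := PySem.List.sublist_of_mem_combinations hpr
  have hmem : op.1 ∈ kv.2 := by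
    apply hsub.mem
    match pr, hop2 with
    | [a, b], hop2 =>
      have h : op = (a, b) ∨ op = (b, a) := by simpa [pvPairOps] using hop2
      rcases h with rfl | rfl <;> simp
  obtain ⟨k, _, rfl⟩ := List.mem_map.mp hkv
  exact List.mem_of_mem_filter hmem

-- A's selection at t: the group of t, with t removed
theorem pv_selA (F : List (List Int)) (i : Int) (js : List Int) (t : Int)
    (hnd : js.Nodup) (ht : t ∈ js) :
    pvSel t (((PySem.Set.ofList (js.map (pvKey F i))).map
        (fun k => (k, js.filter (fun j => pvKey F i j == k)))).flatMap
        (fun kv => (PySem.List.combinations kv.2 2).flatMap pvPairOps))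
      = (js.filter (fun j => pvKey F i j == pvKey F i t)).erase t := by
  rw [pvSel_flatMap, List.flatMap_map]
  have hstep : ∀ k : List Int,
      pvSel t ((PySem.List.combinations (js.filter (fun j => pvKey F i j == k)) 2).flatMap pvPairOps)
        = if t ∈ js.filter (fun j => pvKey F i j == k)
          then (js.filter (fun j => pvKey F i j == k)).erase t else [] :=
    fun k => pv_sel_comb _ t (hnd.filter _)
  have hcongr : ((PySem.Set.ofList (js.map (pvKey F i))).flatMap
        (fun k => pvSel t ((PySem.List.combinations (js.filter (fun j => pvKey F i j == k)) 2).flatMap pvPairOps)))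
      = (PySem.Set.ofList (js.map (pvKey F i))).flatMap
        (fun k => if k = pvKey F i t
          then (js.filter (fun j => pvKey F i j == pvKey F i t)).erase t else []) := by
    congr 1
    funext k
    rw [hstep k]
    by_cases hk : k = pvKey F i t
    · subst hk
      simp [List.mem_filter, ht]
    · have : t ∉ js.filter (fun j => pvKey F i j == k) := by
        intro hm
        exact hk ((beq_iff_eq.mp (List.mem_filter.mp hm).2).symm ▸ rfl)
      simp [this, hk]
  have hkeymem : pvKey F i t ∈ PySem.Set.ofList (js.map (pvKey F i)) := by
    rw [PySem.Set.mem_ofList]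
    exact List.mem_map.mpr ⟨t, ht, rfl⟩
  calc ((PySem.Set.ofList (js.map (pvKey F i))).flatMap _) = _ := hcongr
    _ = _ := by
      rw [pv_flatMap_single _ _ _ (PySem.Set.nodup_ofList _)]
      simp [hkeymem]

-- A's group of t with t erased is exactly B's pairwise filter at t
theorem pv_erase_filter (F : List (List Int)) (i : Int) (js : List Int) (t : Int)
    (hnd : js.Nodup) :
    (js.filter (fun j => pvKey F i j == pvKey F i t)).erase t
      = js.filter (fun p => p != t && (pvKey F i p == pvKey F i t)) := by
  rw [(hnd.filter _).erase_eq_filter, List.filter_filter]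

-- the two ports compute the same sets in the same order
theorem pv_main (F : List (List Int)) (i : Int) : flagAdj F i = flagAdj_alt F i := by
  have hA : flagAdj F i
      = ((((PySem.List.pyRange 0 ((F.length : Nat) : Int) 1).foldl
            (fun d j => d.modify (pvKey F i j) [] (fun l => l ++ [j]))
            PySem.Dict.empty).items).flatMap
          (fun kv => (PySem.List.combinations kv.2 2).flatMap pvPairOps)).foldl pvStep
          ((List.range F.length).map (fun _ => PySem.Set.empty)) := by
    unfold flagAdj
    rw [List.foldl_flatMap]
    have hfun : (fun (d : PySem.Dict (List Int) (List Int)) (j : Int) =>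
        let k := pvKey F i j
        let d := if d.contains k then d else d.insert k []
        d.modify k [] (fun l => l ++ [j]))
        = fun d j => d.modify (pvKey F i j) [] (fun l => l ++ [j]) :=
      funext fun d => funext fun j => pv_dictA_body F i d j
    rw [hfun]
    apply PySem.List.foldl_congr_mem
    intro acc kv _
    exact pv_comb_fold kv.2 acc
  set js := PySem.List.pyRange 0 ((F.length : Nat) : Int) 1 with hjs
  have hjnd : js.Nodup := hjs ▸ PySem.List.nodup_pyRange_one 0 ((F.length : Nat) : Int)
  have hjmem : ∀ x ∈ js, 0 ≤ x ∧ x < (F.length : Int) := by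
    intro x hx
    have := PySem.List.mem_pyRange_one.mp (hjs ▸ hx)
    omega
  -- B's keys list is the map of pvKey over js
  have hkeys : js.foldl (fun ks j => ks ++ [pvKey F i j]) [] = js.map (pvKey F i) := by
    simpa using PySem.List.foldl_append_singleton_eq_map (pvKey F i) js []
  have hB : flagAdj_alt F i
      = js.map (fun j => PySem.Set.ofList (js.filter
          (fun p => p != j && (pvKey F i p == pvKey F i j)))) := by
    unfold flagAdj_alt
    simp only [← hjs, hkeys]
    apply List.map_congr_left
    intro j hj
    congr 1
    apply List.filter_congr
    intro p hp
    have hpj := hjmem p hp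
    have hjj := hjmem j hj
    rw [PySem.List.pyGetD_map_pyRange_of_nonneg (pvKey F i) _ p [] hpj.1 (by exact_mod_cast hpj.2),
      PySem.List.pyGetD_map_pyRange_of_nonneg (pvKey F i) _ j [] hjj.1 (by exact_mod_cast hjj.2)]
  rw [hA, pv_dictA_items, hB]
  set A0 : List (PySem.Set Int) := (List.range F.length).map (fun _ => PySem.Set.empty) with hA0
  have hlen : A0.length = F.length := by simp [hA0]
  have hbA : ∀ op ∈ ((PySem.Set.ofList (js.map (pvKey F i))).map
        (fun k => (k, js.filter (fun j => pvKey F i j == k)))).flatMap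
        (fun kv => (PySem.List.combinations kv.2 2).flatMap pvPairOps),
      0 ≤ op.1 ∧ op.1 < (A0.length : Int) := by
    intro op hm
    rw [hlen]
    exact hjmem _ (pv_opsA_pos F i js op hm)
  apply List.ext_getElem?
  intro t
  rw [pv_pointwise _ _ _ hbA]
  by_cases ht : t < F.length
  · have htjs : (t : Int) ∈ js := by
      rw [hjs, PySem.List.mem_pyRange_one]
      constructor <;> [positivity; exact_mod_cast ht]
    have hA0t : A0[t]? = some PySem.Set.empty := by
      rw [hA0]
      simp [ht]
    have hBt : (js.map (fun j => PySem.Set.ofList (js.filter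
          (fun p => p != j && (pvKey F i p == pvKey F i j)))))[t]?
        = some (PySem.Set.ofList (js.filter
          (fun p => p != (t : Int) && (pvKey F i p == pvKey F i (t : Int))))) := by
      rw [hjs]
      exact PySem.List.getElem?_map_pyRange_zero _ _ _ ht
    rw [hA0t, hBt, pv_selA F i js (t : Int) hjnd htjs]
    have hfoldl : ∀ l : List Int, l.foldl PySem.Set.add PySem.Set.empty = PySem.Set.ofList l :=
      fun l => (PySem.Set.ofList_eq_foldl l).symm
    simp only [Option.map_some]
    rw [hfoldl, pv_erase_filter F i js (t : Int) hjnd]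
  · have h1 : A0[t]? = none := by
      rw [List.getElem?_eq_none_iff, hlen]; omega
    have h2 : (js.map (fun j => PySem.Set.ofList (js.filter
          (fun p => p != j && (pvKey F i p == pvKey F i j)))))[t]? = none := by
      rw [List.getElem?_eq_none_iff, List.length_map, hjs, PySem.List.length_pyRange_one]
      omega
    rw [h1, h2]
    rfl

-- ===== VERDICT (by name: the statement is the Claim_ definition above) =====
theorem flagAdj_spec : Claim_equal_flagAdj := by
  intro F i _ _
  unfold Spec_flagAdj
  exact pv_main F i
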